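-- pv_equiv track=rewrite | github.com/batrachosaurus/EAGLE | EAGLEdb/bactdb_creator.py | get_family
-- ===== SOURCE A (Python) =====
-- def get_family(tax_list, g, sp, st):
--     fam = None
--     n = -1
--     while -n <= len(tax_list):
--         tax_u = None
--         tax_u = tax_list[n].replace(" ", "_")
--         n = n - 1
--         if tax_u == st or tax_u == sp or tax_u == g:
--             continue
--         else:
--             fam = tax_u
--             break
--     return fam
-- ===== SOURCE B (Python) =====
-- def get_family(tax_list, g, sp, st):
--     fam = None
--     for tax in tax_list:
--         tax_u = tax.replace(" ", "_")
--         if tax_u != st and tax_u != sp and tax_u != g: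
--             fam = tax_u
--     return fam
-- ===== Notes on version B (the rewrite author's own statement) =====
-- stated objective: simpler
-- what changed: Forward single pass keeping the last non-matching element in an accumulator, instead of A's backward negative-index while loop with early break.
import Mathlib
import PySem

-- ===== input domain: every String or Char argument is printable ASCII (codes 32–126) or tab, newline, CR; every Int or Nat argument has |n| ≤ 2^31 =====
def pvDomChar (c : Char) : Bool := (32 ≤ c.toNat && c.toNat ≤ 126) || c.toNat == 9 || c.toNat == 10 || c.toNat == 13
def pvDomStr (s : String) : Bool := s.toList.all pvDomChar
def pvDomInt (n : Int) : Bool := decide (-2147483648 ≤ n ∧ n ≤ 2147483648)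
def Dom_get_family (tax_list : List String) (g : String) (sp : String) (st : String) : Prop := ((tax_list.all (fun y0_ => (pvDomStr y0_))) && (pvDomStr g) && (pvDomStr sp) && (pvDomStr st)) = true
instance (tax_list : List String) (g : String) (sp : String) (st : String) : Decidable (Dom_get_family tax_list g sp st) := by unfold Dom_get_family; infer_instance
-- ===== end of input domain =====

-- B is a plain forward fold keeping the last non-matching element; same value as A's backward early-exit scan (objective: simpler).

-- ===== PORT A =====
-- A's while loop with the negative running index n, literal; fam/break become the return value.
def get_family_go (tax_list : List String) (g : String) (sp : String) (st : String) (n : Int) : Option String :=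
  if _h : -n ≤ (tax_list.length : Int) then
    match PySem.List.pyGet? tax_list n with
    | none => none   -- unreachable: Python would raise, but -n ≤ len and n < 0 on every call
    | some t =>
      let tax_u := PySem.Str.replace t " " "_"
      if tax_u == st || tax_u == sp || tax_u == g then
        get_family_go tax_list g sp st (n - 1)
      else some tax_u
  else none
termination_by ((tax_list.length : Int) + n + 1).toNat
decreasing_by omega

def get_family (tax_list : List String) (g : String) (sp : String) (st : String) : Option String :=
  get_family_go tax_list g sp st (-1)

-- ===== PORT B =====
def get_family_alt (tax_list : List String) (g : String) (sp : String) (st : String) : Option String :=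
  tax_list.foldl (fun fam tax =>
    let tax_u := PySem.Str.replace tax " " "_"
    if tax_u != st && tax_u != sp && tax_u != g then some tax_u else fam) none

-- ===== PRECONDITION & SPEC =====
def Spec_get_family (tax_list : List String) (g : String) (sp : String) (st : String) (out : Option String) : Prop := out = get_family_alt tax_list g sp st
instance (tax_list : List String) (g : String) (sp : String) (st : String) (out : Option String) : Decidable (Spec_get_family tax_list g sp st out) := by unfold Spec_get_family; infer_instance

-- ===== CLAIM (what is proved, stated in full; the proofs are below) =====
def Claim_equal_get_family : Prop := ∀ (tax_list : List String) (g : String) (sp : String) (st : String), Dom_get_family tax_list g sp st → Spec_get_family tax_list g sp st (get_family tax_list g sp st)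

-- ===== LEMMAS AND PROOFS =====

-- the common "first hit" function both sides compute against
def pvHit (g sp st tax : String) : Option String :=
  let u := PySem.Str.replace tax " " "_"
  if u == st || u == sp || u == g then none else some u

lemma hit_or (g sp st t : String) (o : Option String) :
    (if (PySem.Str.replace t " " "_" != st && PySem.Str.replace t " " "_" != sp
        && PySem.Str.replace t " " "_" != g) = true
      then some (PySem.Str.replace t " " "_") else o)
    = (pvHit g sp st t).or o := by
  unfold pvHit
  by_cases hc : (PySem.Str.replace t " " "_" == st || PySem.Str.replace t " " "_" == sp
      || PySem.Str.replace t " " "_" == g) = true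
  · rw [if_pos hc]
    have : (PySem.Str.replace t " " "_" != st && PySem.Str.replace t " " "_" != sp
        && PySem.Str.replace t " " "_" != g) = false := by
      simp only [bne, ← Bool.not_or, hc]; rfl
    rw [if_neg (by simp [this]), Option.none_or]
  · rw [if_neg hc]
    have : (PySem.Str.replace t " " "_" != st && PySem.Str.replace t " " "_" != sp
        && PySem.Str.replace t " " "_" != g) = true := by
      simp only [bne, ← Bool.not_or]
      simp only [Bool.not_eq_true'] at *
      simp [hc]
    rw [if_pos this, Option.some_or]

lemma alt_foldl (g sp st : String) :
    ∀ (l : List String) (acc : Option String),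
      l.foldl (fun fam tax =>
        let tax_u := PySem.Str.replace tax " " "_"
        if tax_u != st && tax_u != sp && tax_u != g then some tax_u else fam) acc
      = (l.reverse.findSome? (pvHit g sp st)).or acc := by
  intro l
  induction l with
  | nil => intro acc; simp
  | cons t rest ih =>
    intro acc
    simp only [List.foldl_cons, ih, List.reverse_cons, List.findSome?_append,
      List.findSome?_cons, List.findSome?_nil]
    rw [hit_or]
    cases pvHit g sp st t <;> cases rest.reverse.findSome? (pvHit g sp st) <;> simp

lemma go_eq (l : List String) (g sp st : String) :
    ∀ (d j : Nat), l.length - j = d →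
      get_family_go l g sp st (-(j : Int) - 1)
        = (l.take (l.length - j)).reverse.findSome? (pvHit g sp st) := by
  intro d
  induction d with
  | zero =>
    intro j hj
    rw [get_family_go]
    rw [dif_neg (by omega : ¬ (-(-(j : Int) - 1) ≤ (l.length : Int)))]
    simp [hj]
  | succ d ih =>
    intro j hj
    have hjlen : j < l.length := by omega
    rw [get_family_go]
    rw [dif_pos (by omega : -(-(j : Int) - 1) ≤ (l.length : Int))]
    have hidx : -(j : Int) - 1 = -((j + 1 : Nat) : Int) := by push_cast; ring
    have hlt : l.length - (j + 1) < l.length := by omega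
    have hget : PySem.List.pyGet? l (-(j : Int) - 1) = some l[l.length - (j + 1)] := by
      rw [hidx, PySem.List.pyGet?_neg_natCast _ _ (by omega) (by omega),
        List.getElem?_eq_getElem hlt]
    rw [hget]
    set t := l[l.length - (j + 1)] with ht
    have htake : l.take (l.length - j) = l.take (l.length - (j + 1)) ++ [t] := by
      have h1 : l.length - j = (l.length - (j + 1)) + 1 := by omega
      rw [h1, List.take_add_one, List.getElem?_eq_getElem hlt]
      rfl
    rw [htake]
    simp only [List.reverse_append, List.reverse_singleton, List.singleton_append,
      List.findSome?_cons]
    by_cases hc : (PySem.Str.replace t " " "_" == st || PySem.Str.replace t " " "_" == sp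
        || PySem.Str.replace t " " "_" == g) = true
    · rw [if_pos hc]
      have hnone : pvHit g sp st t = none := by unfold pvHit; rw [if_pos hc]
      rw [hnone]
      have h2 : -(j : Int) - 1 - 1 = -((j + 1 : Nat) : Int) - 1 := by push_cast; ring
      rw [h2, ih (j + 1) (by omega)]
    · rw [if_neg hc]
      have hsome : pvHit g sp st t = some (PySem.Str.replace t " " "_") := by
        unfold pvHit; rw [if_neg hc]
      rw [hsome]

-- ===== VERDICT (by name: the statement is the Claim_ definition above) =====
theorem get_family_spec : Claim_equal_get_family := by
  intro tax_list g sp st _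
  unfold Spec_get_family get_family get_family_alt
  have h0 : (-1 : Int) = -((0 : Nat) : Int) - 1 := by norm_num
  rw [h0, go_eq tax_list g sp st (tax_list.length - 0) 0 rfl, alt_foldl]
  simp
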